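-- pv_equiv track=rewrite | github.com/NBarton1/chess | chess.py | queen
-- ===== SOURCE A (Python) =====
-- def queen(square, owned_pieces_squares, pieces_squares):
--
--     # Necessary variables
--     rank = (square // 8) + 1
--     file = (square % 8) + 1
--
--     close_left = file - 1
--     close_right = 8 - file
--     close_down = rank - 1
--     close_up = 8 - rank
--
--     close_down_left = min(rank, file) - 1
--     close_up_right = min(9 - rank, 9 - file) - 1
--     close_down_right = min(rank, 9 - file) - 1
--     close_up_left = min(9 - rank, file) - 1
--
--     start_rank = 8 * (rank - 1)
--     end_rank = 8 * rank - 1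
--     start_file = file - 1
--     end_file = 55 + file
--
--     start_pos_diagonal = square - (9 * close_down_left)
--     end_pos_diagonal = square + (9 * close_up_right)
--     start_neg_diagonal = square - (7 * close_down_right)
--     end_neg_diagonal = square + (7 * close_up_left)
--
--     possible_moves = set()
--
--     # Rank moves
--     for i in range(start_rank, end_rank + 1):
--         if i in pieces_squares and i < square:
--             close_left = square - i
--             if i in owned_pieces_squares:
--                 close_left -= 1
--         elif i in pieces_squares and i > square:
--             close_right = i - square
--             if i in owned_pieces_squares:
--                 close_right -= 1
--             break
--
--     # File moves
--     for i in range(start_file, end_file + 1, 8):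
--         if i in pieces_squares and i < square:
--             close_down = (square - i) // 8
--             if i in owned_pieces_squares:
--                 close_down -= 1
--         elif i in pieces_squares and i > square:
--             close_up = (i - square) // 8
--             if i in owned_pieces_squares:
--                 close_up -= 1
--             break
--
--     # Positive diagonal moves
--     for i in range(start_pos_diagonal, end_pos_diagonal + 1, 9):
--         if i in pieces_squares and i < square:
--             close_down_left = (square - i) // 9
--             if i in owned_pieces_squares:
--                 close_down_left -= 1
--         elif i in pieces_squares and i > square:
--             close_up_right = (i - square) // 9
--             if i in owned_pieces_squares:
--                 close_up_right -= 1
--             break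
--
--     # Negative diagonal moves
--     for i in range(start_neg_diagonal, end_neg_diagonal + 1, 7):
--         if i in pieces_squares and i < square:
--             close_down_right = (square - i) // 7
--             if i in owned_pieces_squares:
--                 close_down_right -= 1
--         elif i in pieces_squares and i > square:
--             close_up_left = (i - square) // 7
--             if i in owned_pieces_squares:
--                 close_up_left -= 1
--             break
--
--     # Making list of possible moves
--
--     # Horizontal
--     for i in range(square - close_left, square + close_right + 1):
--         possible_moves.add(i)
--
--     # Vertical
--     for i in range(square - (8 * close_down), square + (8 * close_up) + 1, 8):
--         possible_moves.add(i)
--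
--     # Positive diagonal
--     for i in range(square - (9 * close_down_left), square + (9 * close_up_right) + 1, 9):
--         possible_moves.add(i)
--
--     # Negative diagonal
--     for i in range(square - (7 * close_down_right), square + (7 * close_up_left) + 1, 7):
--         possible_moves.add(i)
--
--     # Removing current square
--     possible_moves.discard(square)
--
--     return possible_moves
-- ===== SOURCE B (Python) =====
-- def queen(square, owned_pieces_squares, pieces_squares):
--     rank = square // 8 + 1
--     file = square % 8 + 1
--     # (step, free squares behind, free squares ahead) for each of the four lines
--     lines = [
--         (1, file - 1, 8 - file),
--         (8, rank - 1, 8 - rank),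
--         (9, min(rank, file) - 1, min(9 - rank, 9 - file) - 1),
--         (7, min(rank, 9 - file) - 1, min(9 - rank, file) - 1),
--     ]
--     moves = set()
--     for step, back, fwd in lines:
--         lo = square - step * back
--         hi = square + step * fwd
--         on_line = [p for p in pieces_squares if lo <= p <= hi and (p - square) % step == 0]
--         behind = [p for p in on_line if p < square]
--         ahead = [p for p in on_line if p > square]
--         if behind:
--             b = max(behind)
--             back = (square - b) // step
--             if b in owned_pieces_squares:
--                 back -= 1
--         if ahead:
--             a = min(ahead)
--             fwd = (a - square) // step
--             if a in owned_pieces_squares: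
--                 fwd -= 1
--         for p in range(square - step * back, square + step * fwd + 1, step):
--             if p != square:
--                 moves.add(p)
--     return moves
-- ===== Notes on version B (the rewrite author's own statement) =====
-- stated objective: alternative
-- what changed: Instead of A's square-by-square scan of every board square on each of the four attack lines (with break at the first blocker), B filters pieces_squares once per line and finds the nearest blockers with max/min, then emits each line's range directly, skipping the queen's square instead of discarding it at the end.
import Mathlib
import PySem

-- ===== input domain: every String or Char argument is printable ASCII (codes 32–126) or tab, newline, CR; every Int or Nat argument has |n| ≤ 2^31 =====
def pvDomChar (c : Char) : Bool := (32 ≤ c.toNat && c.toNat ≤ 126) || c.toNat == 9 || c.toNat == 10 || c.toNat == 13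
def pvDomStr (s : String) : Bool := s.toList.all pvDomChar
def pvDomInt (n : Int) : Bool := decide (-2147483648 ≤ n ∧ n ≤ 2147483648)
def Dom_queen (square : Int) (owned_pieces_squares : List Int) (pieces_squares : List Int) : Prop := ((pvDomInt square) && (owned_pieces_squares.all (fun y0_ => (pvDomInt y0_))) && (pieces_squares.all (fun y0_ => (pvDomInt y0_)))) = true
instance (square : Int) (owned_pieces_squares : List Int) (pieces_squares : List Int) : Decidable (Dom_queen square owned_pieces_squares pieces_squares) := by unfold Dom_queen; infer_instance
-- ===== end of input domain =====

-- B replaces A's four square-by-square blocker scans (with break) by, per line, one filter of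
-- pieces_squares plus max/min to find the nearest blockers, emitting each line's range directly
-- and skipping the queen's square instead of discarding it at the end (objective: alternative).

-- ===== PORT A =====
-- All four Python scan loops are the same loop at a different step; this helper is that loop,
-- one call per Python loop.  In the rank loop Python writes 'square - i', which is
-- '(square - i) // 1', so step = 1 there; 'break' is the second branch returning directly.
def pvScanA (sq : Int) (ow pc : List Int) (st : Int) : List Int → Int × Int → Int × Int
  | [], bf => bf
  | i :: rest, (b, f) =>
    if i ∈ pc ∧ i < sq then
      pvScanA sq ow pc st rest
        (if i ∈ ow then PySem.Int.floordiv (sq - i) st - 1 else PySem.Int.floordiv (sq - i) st, f)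
    else if i ∈ pc ∧ i > sq then
      (b, if i ∈ ow then PySem.Int.floordiv (i - sq) st - 1 else PySem.Int.floordiv (i - sq) st)
    else
      pvScanA sq ow pc st rest (b, f)

def queen (square : Int) (owned_pieces_squares : List Int) (pieces_squares : List Int) : List Int :=
  let rank := PySem.Int.floordiv square 8 + 1
  let file := PySem.Int.mod square 8 + 1
  let close_left := file - 1
  let close_right := 8 - file
  let close_down := rank - 1
  let close_up := 8 - rank
  let close_down_left := min rank file - 1
  let close_up_right := min (9 - rank) (9 - file) - 1
  let close_down_right := min rank (9 - file) - 1
  let close_up_left := min (9 - rank) file - 1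
  let start_rank := 8 * (rank - 1)
  let end_rank := 8 * rank - 1
  let start_file := file - 1
  let end_file := 55 + file
  let start_pos_diagonal := square - 9 * close_down_left
  let end_pos_diagonal := square + 9 * close_up_right
  let start_neg_diagonal := square - 7 * close_down_right
  let end_neg_diagonal := square + 7 * close_up_left
  let h := pvScanA square owned_pieces_squares pieces_squares 1
    (PySem.List.pyRange start_rank (end_rank + 1) 1) (close_left, close_right)
  let v := pvScanA square owned_pieces_squares pieces_squares 8
    (PySem.List.pyRange start_file (end_file + 1) 8) (close_down, close_up)
  let pd := pvScanA square owned_pieces_squares pieces_squares 9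
    (PySem.List.pyRange start_pos_diagonal (end_pos_diagonal + 1) 9) (close_down_left, close_up_right)
  let nd := pvScanA square owned_pieces_squares pieces_squares 7
    (PySem.List.pyRange start_neg_diagonal (end_neg_diagonal + 1) 7) (close_down_right, close_up_left)
  let pm : PySem.Set Int := PySem.Set.empty
  let pm := (PySem.List.pyRange (square - h.1) (square + h.2 + 1) 1).foldl
    (fun s i => PySem.Set.add s i) pm
  let pm := (PySem.List.pyRange (square - 8 * v.1) (square + 8 * v.2 + 1) 8).foldl
    (fun s i => PySem.Set.add s i) pm
  let pm := (PySem.List.pyRange (square - 9 * pd.1) (square + 9 * pd.2 + 1) 9).foldl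
    (fun s i => PySem.Set.add s i) pm
  let pm := (PySem.List.pyRange (square - 7 * nd.1) (square + 7 * nd.2 + 1) 7).foldl
    (fun s i => PySem.Set.add s i) pm
  PySem.Set.discard pm square

-- ===== PORT B =====
-- One line of attack: filter pieces to the line, nearest blockers via max/min, emit the range.
def pvLine (sq : Int) (ow pc : List Int) (mv : PySem.Set Int) (line : Int × Int × Int) :
    PySem.Set Int :=
  let st := line.1
  let back0 := line.2.1
  let fwd0 := line.2.2
  let lo := sq - st * back0
  let hi := sq + st * fwd0
  let onLine := pc.filter (fun p => decide (lo ≤ p ∧ p ≤ hi ∧ PySem.Int.mod (p - sq) st = 0))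
  let behind := onLine.filter (fun p => decide (p < sq))
  let ahead := onLine.filter (fun p => decide (p > sq))
  let back :=
    match PySem.List.max? behind (fun x => x) with
    | none => back0
    | some b =>
        let k := PySem.Int.floordiv (sq - b) st
        if b ∈ ow then k - 1 else k
  let fwd :=
    match PySem.List.min? ahead (fun x => x) with
    | none => fwd0
    | some a =>
        let k := PySem.Int.floordiv (a - sq) st
        if a ∈ ow then k - 1 else k
  (PySem.List.pyRange (sq - st * back) (sq + st * fwd + 1) st).foldl
    (fun s p => if p ≠ sq then PySem.Set.add s p else s) mv

def queen_alt (square : Int) (owned_pieces_squares : List Int) (pieces_squares : List Int) : List Int :=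
  let rank := PySem.Int.floordiv square 8 + 1
  let file := PySem.Int.mod square 8 + 1
  let lines : List (Int × Int × Int) :=
    [(1, file - 1, 8 - file),
     (8, rank - 1, 8 - rank),
     (9, min rank file - 1, min (9 - rank) (9 - file) - 1),
     (7, min rank (9 - file) - 1, min (9 - rank) file - 1)]
  lines.foldl (pvLine square owned_pieces_squares pieces_squares) PySem.Set.empty

-- ===== PRECONDITION & SPEC =====
def Spec_queen (square : Int) (owned_pieces_squares : List Int) (pieces_squares : List Int) (out : List Int) : Prop := out = queen_alt square owned_pieces_squares pieces_squares
instance (square : Int) (owned_pieces_squares : List Int) (pieces_squares : List Int) (out : List Int) : Decidable (Spec_queen square owned_pieces_squares pieces_squares out) := by unfold Spec_queen; infer_instance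

-- ===== CLAIM (what is proved, stated in full; the proofs are below) =====
def Claim_equal_queen : Prop := ∀ (square : Int) (owned_pieces_squares : List Int) (pieces_squares : List Int), Dom_queen square owned_pieces_squares pieces_squares → Spec_queen square owned_pieces_squares pieces_squares (queen square owned_pieces_squares pieces_squares)

-- ===== LEMMAS AND PROOFS =====

-- the last element of a strictly increasing list bounds it above
lemma pv_le_getLast (l : List Int) (hl : l.Pairwise (· < ·)) (y : Int) (hy : y ∈ l) :
    ∀ h : l ≠ [], y ≤ l.getLast h := by
  induction l with
  | nil => cases hy
  | cons a t ih =>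
    intro h
    rcases List.pairwise_cons.mp hl with ⟨ha, ht⟩
    rcases List.mem_cons.mp hy with rfl | hyt
    · cases t with
      | nil => simp [List.getLast]
      | cons b t' =>
        rw [List.getLast_cons (by simp)]
        exact le_of_lt (ha _ (List.getLast_mem _))
    · have htne : t ≠ [] := by intro hh; subst hh; cases hyt
      rw [List.getLast_cons htne]
      exact ih ht hyt htne

-- A's scan with break, on a strictly increasing list, computes: the adjusted distance to the
-- LAST in-range piece below the square, and to the FIRST in-range piece above it.
lemma pvScanA_sorted (sq : Int) (ow pc : List Int) (st : Int) (L : List Int)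
    (hL : L.Pairwise (· < ·)) (b0 f0 : Int) :
    pvScanA sq ow pc st L (b0, f0) =
      ((L.filter (fun i => decide (i ∈ pc ∧ i < sq))).foldl
          (fun _ i => if i ∈ ow then PySem.Int.floordiv (sq - i) st - 1
            else PySem.Int.floordiv (sq - i) st) b0,
        match (L.filter (fun i => decide (i ∈ pc ∧ i > sq))).head? with
        | some a => if a ∈ ow then PySem.Int.floordiv (a - sq) st - 1
            else PySem.Int.floordiv (a - sq) st
        | none => f0) := by
  induction L generalizing b0 with
  | nil => simp [pvScanA]
  | cons i rest ih =>
    rcases List.pairwise_cons.mp hL with ⟨hfst, hrest⟩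
    by_cases hb : i ∈ pc ∧ i < sq
    · have hna : ¬ (i ∈ pc ∧ i > sq) := by rintro ⟨_, hgt⟩; omega
      simp only [pvScanA, if_pos hb, if_neg hna]
      rw [ih hrest]
      simp only [List.filter_cons, decide_eq_true_eq, if_pos hb, if_neg hna,
        List.foldl_cons]
    · by_cases ha : i ∈ pc ∧ i > sq
      · have hrest_nil : rest.filter (fun j => decide (j ∈ pc ∧ j < sq)) = [] := by
          apply List.filter_eq_nil_iff.mpr
          intro j hj
          simp only [decide_eq_true_eq]
          rintro ⟨_, hlt⟩
          have := hfst j hj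
          omega
        simp only [pvScanA, if_neg hb, if_pos ha]
        rw [show ((i :: rest).filter (fun j => decide (j ∈ pc ∧ j < sq))) = [] by
          simp only [List.filter_cons, decide_eq_true_eq, if_neg hb]; exact hrest_nil]
        rw [show ((i :: rest).filter (fun j => decide (j ∈ pc ∧ j > sq))) = i :: (rest.filter (fun j => decide (j ∈ pc ∧ j > sq))) by
          simp only [List.filter_cons, decide_eq_true_eq, if_pos ha]]
        rfl
      · simp only [pvScanA, if_neg hb, if_neg ha]
        rw [ih hrest]
        simp only [List.filter_cons, decide_eq_true_eq, if_neg hb, if_neg ha]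


-- keeping only the last element of a strictly increasing list = taking the numeric max
lemma pv_foldl_last_eq_max? (l1 l2 : List Int) (hmem : ∀ x, x ∈ l1 ↔ x ∈ l2)
    (hl1 : l1.Pairwise (· < ·)) (f : Int → Int) (b0 : Int) :
    l1.foldl (fun _ i => f i) b0 =
      (match PySem.List.max? l2 (fun x => x) with
       | some m => f m
       | none => b0) := by
  cases hmax : PySem.List.max? l2 (fun x => x) with
  | none =>
    have : l2 = [] := (PySem.List.max?_eq_none_iff _ _).mp hmax
    subst this
    have : l1 = [] := by
      cases l1 with
      | nil => rfl
      | cons a t => exact absurd ((hmem a).mp (by simp)) (by simp)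
    subst this
    rfl
  | some m =>
    have hm2 : m ∈ l2 := PySem.List.max?_mem hmax
    have hm1 : m ∈ l1 := (hmem m).mpr hm2
    have hne : l1 ≠ [] := by intro hh; subst hh; cases hm1
    have hfold : l1.foldl (fun _ i => f i) b0 = f (l1.getLast hne) := by
      clear hmem hl1 hm1
      induction l1 generalizing b0 with
      | nil => exact absurd rfl hne
      | cons a t ih =>
        cases t with
        | nil => simp [List.getLast]
        | cons b t' =>
          rw [List.foldl_cons, ih (f a) (by simp)]
          exact congrArg f (List.getLast_cons (by simp)).symm
    rw [hfold]
    congr 1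
    have h1 : l1.getLast hne ≤ m :=
      PySem.List.max?_isMax hmax _ ((hmem _).mp (List.getLast_mem hne))
    have h2 : m ≤ l1.getLast hne := pv_le_getLast l1 hl1 m hm1 hne
    omega

lemma pv_head_eq_min? (l1 l2 : List Int) (hmem : ∀ x, x ∈ l1 ↔ x ∈ l2)
    (hl1 : l1.Pairwise (· < ·)) (f : Int → Int) (f0 : Int) :
    (match l1.head? with | some a => f a | none => f0) =
      (match PySem.List.min? l2 (fun x => x) with
       | some m => f m
       | none => f0) := by
  cases l1 with
  | nil =>
    have : l2 = [] := by
      cases hl : l2 with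
      | nil => rfl
      | cons a t => exact absurd ((hmem a).mpr (by simp [hl])) (by simp)
    simp [this, PySem.List.min?]
  | cons h t =>
    have hh2 : h ∈ l2 := (hmem h).mp (by simp)
    cases hmin : PySem.List.min? l2 (fun x => x) with
    | none =>
      have : l2 = [] := (PySem.List.min?_eq_none_iff _ _).mp hmin
      subst this; cases hh2
    | some m =>
      simp only [List.head?_cons]
      congr 1
      have h1 : m ≤ h := PySem.List.min?_isMin hmin _ hh2
      have hm1 : m ∈ h :: t := (hmem m).mpr (PySem.List.min?_mem hmin)
      have h2 : h ≤ m := by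
        rcases List.mem_cons.mp hm1 with rfl | hmt
        · omega
        · exact le_of_lt ((List.pairwise_cons.mp hl1).1 m hmt)
      omega

lemma pv_pairwise_pyRange (a b st : Int) (hst : 0 < st) :
    (PySem.List.pyRange a b st).Pairwise (· < ·) := by
  rw [PySem.List.pyRange_of_pos _ _ hst]
  rw [List.pairwise_map]
  apply List.Pairwise.imp ?_ (List.pairwise_lt_range)
  intro k1 k2 hk
  have : (k1 : Int) < (k2 : Int) := by exact_mod_cast hk
  nlinarith

-- pvLine = A's scan followed by A's range emission, square skipped
lemma pv_line_core (sq : Int) (ow pc : List Int) (st b0 f0 : Int) (hst : 0 < st)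
    (mv : PySem.Set Int) :
    pvLine sq ow pc mv (st, b0, f0) =
      (PySem.List.pyRange
          (sq - st * (pvScanA sq ow pc st
            (PySem.List.pyRange (sq - st * b0) (sq + st * f0 + 1) st) (b0, f0)).1)
          (sq + st * (pvScanA sq ow pc st
            (PySem.List.pyRange (sq - st * b0) (sq + st * f0 + 1) st) (b0, f0)).2 + 1) st).foldl
        (fun s p => if p ≠ sq then PySem.Set.add s p else s) mv := by
  have hPW := pv_pairwise_pyRange (sq - st * b0) (sq + st * f0 + 1) st hst
  have hdvd : ∀ x : Int, (st ∣ x - (sq - st * b0)) ↔ PySem.Int.mod (x - sq) st = 0 := by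
    intro x
    rw [PySem.Int.mod_eq_zero_iff_dvd]
    have hx : x - (sq - st * b0) = st * b0 + (x - sq) := by ring
    rw [hx, dvd_add_right ⟨b0, rfl⟩]
  have hmemB : ∀ x, x ∈ (PySem.List.pyRange (sq - st * b0) (sq + st * f0 + 1) st).filter
        (fun i => decide (i ∈ pc ∧ i < sq)) ↔
      x ∈ (pc.filter (fun p => decide (sq - st * b0 ≤ p ∧ p ≤ sq + st * f0 ∧
          PySem.Int.mod (p - sq) st = 0))).filter (fun p => decide (p < sq)) := by
    intro x
    simp only [List.mem_filter, decide_eq_true_eq, PySem.List.mem_pyRange_iff_of_pos hst,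
      ← hdvd x]
    constructor
    · rintro ⟨⟨h1, h2, h3⟩, h4, h5⟩
      exact ⟨⟨h4, h1, by omega, h3⟩, h5⟩
    · rintro ⟨⟨h4, h1, h2, h3⟩, h5⟩
      exact ⟨⟨h1, by omega, h3⟩, h4, h5⟩
  have hmemA : ∀ x, x ∈ (PySem.List.pyRange (sq - st * b0) (sq + st * f0 + 1) st).filter
        (fun i => decide (i ∈ pc ∧ i > sq)) ↔
      x ∈ (pc.filter (fun p => decide (sq - st * b0 ≤ p ∧ p ≤ sq + st * f0 ∧
          PySem.Int.mod (p - sq) st = 0))).filter (fun p => decide (p > sq)) := by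
    intro x
    simp only [List.mem_filter, decide_eq_true_eq, PySem.List.mem_pyRange_iff_of_pos hst,
      ← hdvd x]
    constructor
    · rintro ⟨⟨h1, h2, h3⟩, h4, h5⟩
      exact ⟨⟨h4, h1, by omega, h3⟩, h5⟩
    · rintro ⟨⟨h4, h1, h2, h3⟩, h5⟩
      exact ⟨⟨h1, by omega, h3⟩, h4, h5⟩
  have hback := pv_foldl_last_eq_max? _ _ hmemB (List.Pairwise.filter _ hPW)
    (fun i => if i ∈ ow then PySem.Int.floordiv (sq - i) st - 1
      else PySem.Int.floordiv (sq - i) st) b0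
  have hfwd := pv_head_eq_min? _ _ hmemA (List.Pairwise.filter _ hPW)
    (fun a => if a ∈ ow then PySem.Int.floordiv (a - sq) st - 1
      else PySem.Int.floordiv (a - sq) st) f0
  simp only [pvLine]
  rw [pvScanA_sorted sq ow pc st _ hPW b0 f0]
  rw [hback, hfwd]
  rcases PySem.List.max?
      (List.filter (fun p => decide (p < sq))
        (List.filter (fun p => decide (sq - st * b0 ≤ p ∧ p ≤ sq + st * f0 ∧
          PySem.Int.mod (p - sq) st = 0)) pc)) (fun x => x) with _ | b <;>
    rcases PySem.List.min?
      (List.filter (fun p => decide (p > sq))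
        (List.filter (fun p => decide (sq - st * b0 ≤ p ∧ p ≤ sq + st * f0 ∧
          PySem.Int.mod (p - sq) st = 0)) pc)) (fun x => x) with _ | a <;> rfl

lemma pv_discard_add_self (s : PySem.Set Int) (x : Int) :
    PySem.Set.discard (PySem.Set.add s x) x = PySem.Set.discard s x := by
  simp only [PySem.Set.discard, PySem.Set.add]
  split
  · rfl
  · simp [List.filter_append]

lemma pv_discard_add_ne (s : PySem.Set Int) (p x : Int) (h : p ≠ x) :
    PySem.Set.discard (PySem.Set.add s p) x = PySem.Set.add (PySem.Set.discard s x) p := by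
  simp only [PySem.Set.discard, PySem.Set.add]
  by_cases hp : p ∈ s
  · have : p ∈ s.filter (fun y => !y == x) := by
      simp [List.mem_filter, hp, h]
    simp [hp, this]
  · have : p ∉ s.filter (fun y => !y == x) := by
      simp [List.mem_filter, hp]
    simp [hp, this, h]

-- discarding at the end = skipping during insertion
lemma pv_discard_foldl (x : Int) (l : List Int) (s : PySem.Set Int) :
    PySem.Set.discard (l.foldl (fun s i => PySem.Set.add s i) s) x =
      l.foldl (fun s p => if p ≠ x then PySem.Set.add s p else s) (PySem.Set.discard s x) := by
  induction l generalizing s with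
  | nil => rfl
  | cons p t ih =>
    rw [List.foldl_cons, List.foldl_cons, ih]
    by_cases hp : p = x
    · subst hp
      rw [pv_discard_add_self]
      simp
    · rw [pv_discard_add_ne _ _ _ hp]
      simp [hp]

-- ===== VERDICT (by name: the statement is the Claim_ definition above) =====
theorem queen_spec : Claim_equal_queen := by
  unfold Claim_equal_queen
  intro sq ow pc _
  unfold Spec_queen queen queen_alt
  simp only [List.foldl_cons, List.foldl_nil]
  rw [pv_line_core sq ow pc 1 _ _ (by norm_num), pv_line_core sq ow pc 8 _ _ (by norm_num),
      pv_line_core sq ow pc 9 _ _ (by norm_num), pv_line_core sq ow pc 7 _ _ (by norm_num)]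
  rw [pv_discard_foldl, pv_discard_foldl, pv_discard_foldl, pv_discard_foldl]
  have hkey : PySem.Int.floordiv sq 8 * 8 + PySem.Int.mod sq 8 = sq :=
    PySem.Int.floordiv_mul_add_mod sq 8
  rw [show PySem.List.pyRange (8 * (PySem.Int.floordiv sq 8 + 1 - 1))
        (8 * (PySem.Int.floordiv sq 8 + 1) - 1 + 1) =
      PySem.List.pyRange (sq - 1 * (PySem.Int.mod sq 8 + 1 - 1))
        (sq + 1 * (8 - (PySem.Int.mod sq 8 + 1)) + 1) by
    rw [show (8 : Int) * (PySem.Int.floordiv sq 8 + 1 - 1) =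
        sq - 1 * (PySem.Int.mod sq 8 + 1 - 1) by omega,
      show (8 : Int) * (PySem.Int.floordiv sq 8 + 1) - 1 + 1 =
        sq + 1 * (8 - (PySem.Int.mod sq 8 + 1)) + 1 by omega]]
  rw [show PySem.List.pyRange (PySem.Int.mod sq 8 + 1 - 1)
        (55 + (PySem.Int.mod sq 8 + 1) + 1) 8 =
      PySem.List.pyRange (sq - 8 * (PySem.Int.floordiv sq 8 + 1 - 1))
        (sq + 8 * (8 - (PySem.Int.floordiv sq 8 + 1)) + 1) 8 by
    rw [show PySem.Int.mod sq 8 + 1 - 1 =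
        sq - 8 * (PySem.Int.floordiv sq 8 + 1 - 1) by omega,
      show (55 : Int) + (PySem.Int.mod sq 8 + 1) + 1 =
        sq + 8 * (8 - (PySem.Int.floordiv sq 8 + 1)) + 1 by omega]]
  simp only [one_mul]
  rfl
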